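-- pv_equiv track=rewrite | github.com/RicardoAlc1988/Contests | Coursera/UC San Diego/Algoritm toolbox/Dynamic Programming/SplittingThePirateLoop (2).py | splitting_pirate_loot
-- ===== SOURCE A (Python) =====
-- def splitting_pirate_loot(i: int, sum_set_1: int, sum_set_2 : int, sum_set_3: int, loot, result_cache):
--
--     if (i, sum_set_1, sum_set_2, sum_set_3) in result_cache:
--         return result_cache[(i, sum_set_1, sum_set_2, sum_set_3)]
--
--     if i == 0:
--         if sum_set_1 == 0 and sum_set_2 == 0 and sum_set_3 == 0:
--             return 1
--         else:
--             return 0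
--     best_result = max(splitting_pirate_loot(i-1, sum_set_1 - loot[i-1], sum_set_2, sum_set_3, loot, result_cache),
--                       splitting_pirate_loot(i-1, sum_set_1, sum_set_2 - loot[i-1], sum_set_3, loot, result_cache),
--                       splitting_pirate_loot(i-1, sum_set_1, sum_set_2, sum_set_3 - loot[i-1], loot, result_cache)
--                      )
--     result_cache[(i, sum_set_1, sum_set_2, sum_set_3)] = best_result
--     return best_result
-- ===== SOURCE B (Python) =====
-- def splitting_pirate_loot(i, sum_set_1, sum_set_2, sum_set_3, loot, result_cache):
--     # Iterative layered DP instead of recursion: enumerate reachable states per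
--     # level top-down, then evaluate values bottom-up level by level. Reads
--     # result_cache, never mutates it (return-value equivalence only).
--     n = i
--     layers = [None] * (n + 1)
--     layers[n] = {(sum_set_1, sum_set_2, sum_set_3)}
--     for j in range(n, 0, -1):
--         prev = set()
--         for (a, b, c) in layers[j]:
--             if (j, a, b, c) not in result_cache:
--                 v = loot[j - 1]
--                 prev.add((a - v, b, c))
--                 prev.add((a, b - v, c))
--                 prev.add((a, b, c - v))
--         layers[j - 1] = prev
--     val = {}
--     for (a, b, c) in layers[0]:
--         if (0, a, b, c) in result_cache:
--             val[(a, b, c)] = result_cache[(0, a, b, c)]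
--         else:
--             val[(a, b, c)] = 1 if a == 0 and b == 0 and c == 0 else 0
--     for j in range(1, n + 1):
--         nxt = {}
--         for (a, b, c) in layers[j]:
--             if (j, a, b, c) in result_cache:
--                 nxt[(a, b, c)] = result_cache[(j, a, b, c)]
--             else:
--                 v = loot[j - 1]
--                 nxt[(a, b, c)] = max(val[(a - v, b, c)], val[(a, b - v, c)], val[(a, b, c - v)])
--         val = nxt
--     return val[(sum_set_1, sum_set_2, sum_set_3)]
-- ===== Notes on version B (the rewrite author's own statement) =====
-- stated objective: alternative
-- what changed: A is a top-down memoized recursion writing results back into the shared cache; B is a non-recursive two-phase layered DP: it first enumerates the reachable (s1,s2,s3) state set at each level top-down, then evaluates a value table per level bottom-up, reading the given cache without mutating it.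
import Mathlib
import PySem

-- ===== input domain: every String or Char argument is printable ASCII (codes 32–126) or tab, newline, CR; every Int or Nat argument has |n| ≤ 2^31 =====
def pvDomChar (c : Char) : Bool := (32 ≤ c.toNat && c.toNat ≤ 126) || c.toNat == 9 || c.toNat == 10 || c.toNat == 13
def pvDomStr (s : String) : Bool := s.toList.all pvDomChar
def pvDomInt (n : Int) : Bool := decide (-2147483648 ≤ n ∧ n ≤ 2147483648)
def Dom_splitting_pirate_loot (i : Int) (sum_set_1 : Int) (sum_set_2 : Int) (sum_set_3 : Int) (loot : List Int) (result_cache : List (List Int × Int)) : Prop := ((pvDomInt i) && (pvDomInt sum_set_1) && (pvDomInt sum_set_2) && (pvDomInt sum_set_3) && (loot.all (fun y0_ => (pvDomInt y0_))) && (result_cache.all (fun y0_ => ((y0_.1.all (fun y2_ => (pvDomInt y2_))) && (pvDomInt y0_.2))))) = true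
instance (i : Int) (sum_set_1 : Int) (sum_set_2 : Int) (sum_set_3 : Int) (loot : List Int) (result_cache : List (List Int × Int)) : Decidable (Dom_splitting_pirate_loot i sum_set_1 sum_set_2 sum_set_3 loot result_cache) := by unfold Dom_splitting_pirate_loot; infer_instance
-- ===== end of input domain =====

-- B replaces A's top-down memoized recursion (which writes into the shared cache) by a
-- non-recursive two-phase layered DP: enumerate the reachable states per level top-down,
-- then evaluate per-level value tables bottom-up, only READING the given cache; the
-- equivalence is about the RETURN value only (Python A mutates result_cache in place,
-- B does not).

-- ===== PORT A =====
-- Recursion on i is carried by the Nat i.toNat (faithful for 0 ≤ i; Pre_ excludes i < 0,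
-- where Python A recurses without bound).  loot[i-1] is PySem.List.pyGet?; the .getD 0
-- default is only reached where Python raises IndexError, which Pre_ excludes.
def pirateA (loot : List Int) : Nat → Int → Int → Int → PySem.Dict (List Int) Int → Int × PySem.Dict (List Int) Int
  | n, a, b, c, cache =>
    match cache.get? [(n : Int), a, b, c] with
    | some v => (v, cache)
    | none =>
      match n with
      | 0 => ((if a = 0 ∧ b = 0 ∧ c = 0 then (1 : Int) else 0), cache)
      | Nat.succ m =>
        let p1 := pirateA loot m (a - (PySem.List.pyGet? loot (m : Int)).getD 0) b c cache
        let p2 := pirateA loot m a (b - (PySem.List.pyGet? loot (m : Int)).getD 0) c p1.2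
        let p3 := pirateA loot m a b (c - (PySem.List.pyGet? loot (m : Int)).getD 0) p2.2
        (max p1.1 (max p2.1 p3.1),
         p3.2.insert [((Nat.succ m : Nat) : Int), a, b, c] (max p1.1 (max p2.1 p3.1)))

def splitting_pirate_loot (i : Int) (sum_set_1 : Int) (sum_set_2 : Int) (sum_set_3 : Int) (loot : List Int) (result_cache : List (List Int × Int)) : Int :=
  (pirateA loot i.toNat sum_set_1 sum_set_2 sum_set_3 ⟨result_cache⟩).1

-- ===== PORT B =====
-- Phase 1 step: from the state set at level j build the state set at level j-1
-- (children only of states whose key is not in the cache).  v = loot[j-1] is computed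
-- per expanded state, as in Source B.
def stepDown (loot : List Int) (rc : PySem.Dict (List Int) Int) (j : Nat) (cur : PySem.Set (Int × Int × Int)) : PySem.Set (Int × Int × Int) :=
  cur.foldl (fun prev s =>
    if (rc.get? [(j : Int), s.1, s.2.1, s.2.2]).isSome then prev
    else
      let v := (PySem.List.pyGet? loot ((j : Int) - 1)).getD 0
      PySem.Set.add (PySem.Set.add (PySem.Set.add prev (s.1 - v, s.2.1, s.2.2)) (s.1, s.2.1 - v, s.2.2)) (s.1, s.2.1, s.2.2 - v))
    PySem.Set.empty

-- The layer list [(j, states_j), (j-1, states_{j-1}), …, (0, states_0)] (Source B's `layers`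
-- array, built by the downward loop).
def buildLayers (loot : List Int) (rc : PySem.Dict (List Int) Int) : Nat → PySem.Set (Int × Int × Int) → List (Nat × PySem.Set (Int × Int × Int))
  | 0, cur => [(0, cur)]
  | Nat.succ j, cur => (Nat.succ j, cur) :: buildLayers loot rc j (stepDown loot rc (Nat.succ j) cur)

-- Phase 2 base: the value table for level 0 (Source B's first `val` loop).
def evalBase (rc : PySem.Dict (List Int) Int) (L : PySem.Set (Int × Int × Int)) : PySem.Dict (Int × Int × Int) Int :=
  L.foldl (fun d s =>
    match rc.get? [(0 : Int), s.1, s.2.1, s.2.2] with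
    | some w => d.insert s w
    | none => d.insert s (if s.1 = 0 ∧ s.2.1 = 0 ∧ s.2.2 = 0 then (1 : Int) else 0))
    PySem.Dict.empty

-- Phase 2 step: the value table for level j from the one for level j-1 (Source B's second
-- loop).  Python's val[child] KeyErrors on a missing key; the .getD 0 default here is
-- never reached: phase 1 put every needed child into the layer below (proved below).
def evalStep (loot : List Int) (rc : PySem.Dict (List Int) Int) (j : Nat) (L : PySem.Set (Int × Int × Int)) (vprev : PySem.Dict (Int × Int × Int) Int) : PySem.Dict (Int × Int × Int) Int :=
  L.foldl (fun d s =>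
    match rc.get? [(j : Int), s.1, s.2.1, s.2.2] with
    | some w => d.insert s w
    | none =>
      let v := (PySem.List.pyGet? loot ((j : Int) - 1)).getD 0
      d.insert s (max ((vprev.get? (s.1 - v, s.2.1, s.2.2)).getD 0)
                  (max ((vprev.get? (s.1, s.2.1 - v, s.2.2)).getD 0)
                       ((vprev.get? (s.1, s.2.1, s.2.2 - v)).getD 0))))
    PySem.Dict.empty

-- Fold the layer list bottom-up into the top level's value table (Source B's upward loop).
def evalUp (loot : List Int) (rc : PySem.Dict (List Int) Int) : List (Nat × PySem.Set (Int × Int × Int)) → PySem.Dict (Int × Int × Int) Int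
  | [] => PySem.Dict.empty
  | [(_, L0)] => evalBase rc L0
  | (j, L) :: rest => evalStep loot rc j L (evalUp loot rc rest)

def splitting_pirate_loot_alt (i : Int) (sum_set_1 : Int) (sum_set_2 : Int) (sum_set_3 : Int) (loot : List Int) (result_cache : List (List Int × Int)) : Int :=
  -- final val[(s1,s2,s3)]: the key is always present (the top state is in the top layer);
  -- .getD 0 is never reached
  ((evalUp loot ⟨result_cache⟩
      (buildLayers loot ⟨result_cache⟩ i.toNat (PySem.Set.add PySem.Set.empty (sum_set_1, sum_set_2, sum_set_3)))).get?
    (sum_set_1, sum_set_2, sum_set_3)).getD 0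

-- ===== PRECONDITION & SPEC =====
-- Pre_ is exactly where Python A returns: i < 0 recurses without bound, and i > len(loot)
-- raises IndexError at loot[i-1] unless the top-level key is already cached.
def Pre_splitting_pirate_loot (i : Int) (sum_set_1 : Int) (sum_set_2 : Int) (sum_set_3 : Int) (loot : List Int) (result_cache : List (List Int × Int)) : Prop :=
  0 ≤ i ∧ (i ≤ (loot.length : Int) ∨ [i, sum_set_1, sum_set_2, sum_set_3] ∈ result_cache.map Prod.fst)
instance (i : Int) (sum_set_1 : Int) (sum_set_2 : Int) (sum_set_3 : Int) (loot : List Int) (result_cache : List (List Int × Int)) : Decidable (Pre_splitting_pirate_loot i sum_set_1 sum_set_2 sum_set_3 loot result_cache) := by unfold Pre_splitting_pirate_loot; infer_instance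

def pvWitness_splitting_pirate_loot : Int × Int × Int × Int × List Int × (List (List Int × Int)) := (2, 3, 1, 1, [1, 2, 3], [([1, 0, 0, 0], 5)])

def Spec_splitting_pirate_loot (i : Int) (sum_set_1 : Int) (sum_set_2 : Int) (sum_set_3 : Int) (loot : List Int) (result_cache : List (List Int × Int)) (out : Int) : Prop := out = splitting_pirate_loot_alt i sum_set_1 sum_set_2 sum_set_3 loot result_cache
instance (i : Int) (sum_set_1 : Int) (sum_set_2 : Int) (sum_set_3 : Int) (loot : List Int) (result_cache : List (List Int × Int)) (out : Int) : Decidable (Spec_splitting_pirate_loot i sum_set_1 sum_set_2 sum_set_3 loot result_cache out) := by unfold Spec_splitting_pirate_loot; infer_instance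

-- ===== CLAIM (what is proved, stated in full; the proofs are below) =====
def Claim_equal_splitting_pirate_loot : Prop := ∀ (i : Int) (sum_set_1 : Int) (sum_set_2 : Int) (sum_set_3 : Int) (loot : List Int) (result_cache : List (List Int × Int)), Dom_splitting_pirate_loot i sum_set_1 sum_set_2 sum_set_3 loot result_cache → Pre_splitting_pirate_loot i sum_set_1 sum_set_2 sum_set_3 loot result_cache → Spec_splitting_pirate_loot i sum_set_1 sum_set_2 sum_set_3 loot result_cache (splitting_pirate_loot i sum_set_1 sum_set_2 sum_set_3 loot result_cache)

-- ===== LEMMAS AND PROOFS =====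

-- The pure specification both ports are proved equal to: A's recursion with the cache
-- read at its ORIGINAL contents and never written.
def gP (loot : List Int) (rc : PySem.Dict (List Int) Int) : Nat → Int → Int → Int → Int
  | n, a, b, c =>
    match rc.get? [(n : Int), a, b, c] with
    | some v => v
    | none =>
      match n with
      | 0 => if a = 0 ∧ b = 0 ∧ c = 0 then (1 : Int) else 0
      | Nat.succ m =>
        max (gP loot rc m (a - (PySem.List.pyGet? loot (m : Int)).getD 0) b c)
          (max (gP loot rc m a (b - (PySem.List.pyGet? loot (m : Int)).getD 0) c)
            (gP loot rc m a b (c - (PySem.List.pyGet? loot (m : Int)).getD 0)))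

-- ---- A side: the evolving cache extends rc only by entries that record gP's value. ----
def InvA (loot : List Int) (rc cache : PySem.Dict (List Int) Int) : Prop :=
  (∀ k v, cache.get? k = some v → rc.get? k = some v ∨
    (rc.get? k = none ∧ ∃ (m : Nat) (a b c : Int), k = [((m + 1 : Nat) : Int), a, b, c] ∧ v = gP loot rc (m + 1) a b c)) ∧
  (∀ k v, rc.get? k = some v → cache.get? k = some v)

theorem invA_insert (loot : List Int) (rc cache : PySem.Dict (List Int) Int) (m : Nat) (a b c best : Int)
    (h : InvA loot rc cache) (hrc : rc.get? [((m + 1 : Nat) : Int), a, b, c] = none)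
    (hbest : best = gP loot rc (m + 1) a b c) :
    InvA loot rc (cache.insert [((m + 1 : Nat) : Int), a, b, c] best) := by
  constructor
  · intro k v hget
    rw [PySem.Dict.get?_insert] at hget
    by_cases hk : k = [((m + 1 : Nat) : Int), a, b, c]
    · rw [if_pos hk] at hget
      refine Or.inr ⟨hk ▸ hrc, m, a, b, c, hk, ?_⟩
      cases hget; exact hbest
    · rw [if_neg hk] at hget; exact h.1 k v hget
  · intro k v hget
    rw [PySem.Dict.get?_insert]
    by_cases hk : k = [((m + 1 : Nat) : Int), a, b, c]
    · exfalso; rw [hk, hrc] at hget; cases hget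
    · rw [if_neg hk]; exact h.2 k v hget

theorem lemA (loot : List Int) (rc : PySem.Dict (List Int) Int) :
    ∀ (n : Nat) (a b c : Int) (cache : PySem.Dict (List Int) Int), InvA loot rc cache →
      (pirateA loot n a b c cache).1 = gP loot rc n a b c ∧ InvA loot rc (pirateA loot n a b c cache).2 := by
  intro n
  induction n with
  | zero =>
    intro a b c cache hInv
    rw [pirateA]
    cases hget : cache.get? [((0 : Nat) : Int), a, b, c] with
    | some v =>
      refine ⟨?_, hInv⟩
      rcases hInv.1 _ _ hget with hrc | ⟨_, m, a', b', c', hk, _⟩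
      · rw [gP, hrc]
      · exfalso
        have h0 : ((0 : Nat) : Int) = ((m + 1 : Nat) : Int) := by
          simpa using congrArg (fun l => l.headI) hk
        omega
    | none =>
      have hrc : rc.get? [((0 : Nat) : Int), a, b, c] = none := by
        cases h2 : rc.get? [((0 : Nat) : Int), a, b, c] with
        | none => rfl
        | some w => exfalso; have := hInv.2 _ _ h2; rw [hget] at this; cases this
      rw [gP, hrc]
      exact ⟨rfl, hInv⟩
  | succ m ih =>
    intro a b c cache hInv
    rw [pirateA]
    cases hget : cache.get? [((m + 1 : Nat) : Int), a, b, c] with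
    | some v =>
      refine ⟨?_, hInv⟩
      rcases hInv.1 _ _ hget with hrc | ⟨_, m', a', b', c', hk, hv⟩
      · rw [gP, hrc]
      · have hm : m = m' ∧ a = a' ∧ b = b' ∧ c = c' := by
          simp only [List.cons.injEq, and_true] at hk
          refine ⟨?_, hk.2.1, hk.2.2.1, hk.2.2.2⟩
          have hmm : m + 1 = m' + 1 := by exact_mod_cast hk.1
          omega
        obtain ⟨h1, h2, h3, h4⟩ := hm
        subst h1; subst h2; subst h3; subst h4
        exact hv
    | none =>
      have hrc : rc.get? [((m + 1 : Nat) : Int), a, b, c] = none := by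
        cases h2 : rc.get? [((m + 1 : Nat) : Int), a, b, c] with
        | none => rfl
        | some w => exfalso; have := hInv.2 _ _ h2; rw [hget] at this; cases this
      have h1 := ih (a - (PySem.List.pyGet? loot (m : Int)).getD 0) b c cache hInv
      have h2 := ih a (b - (PySem.List.pyGet? loot (m : Int)).getD 0) c
        (pirateA loot m (a - (PySem.List.pyGet? loot (m : Int)).getD 0) b c cache).2 h1.2
      have h3 := ih a b (c - (PySem.List.pyGet? loot (m : Int)).getD 0)
        (pirateA loot m a (b - (PySem.List.pyGet? loot (m : Int)).getD 0) c
          (pirateA loot m (a - (PySem.List.pyGet? loot (m : Int)).getD 0) b c cache).2).2 h2.2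
      have hbest : max (pirateA loot m (a - (PySem.List.pyGet? loot (m : Int)).getD 0) b c cache).1
          (max (pirateA loot m a (b - (PySem.List.pyGet? loot (m : Int)).getD 0) c
              (pirateA loot m (a - (PySem.List.pyGet? loot (m : Int)).getD 0) b c cache).2).1
            (pirateA loot m a b (c - (PySem.List.pyGet? loot (m : Int)).getD 0)
              (pirateA loot m a (b - (PySem.List.pyGet? loot (m : Int)).getD 0) c
                (pirateA loot m (a - (PySem.List.pyGet? loot (m : Int)).getD 0) b c cache).2).2).1)
          = gP loot rc (m + 1) a b c := by
        rw [h1.1, h2.1, h3.1, gP, hrc]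
      exact ⟨hbest, invA_insert loot rc _ m a b c _ h3.2 hrc hbest⟩

-- ---- B side ----

-- Generic: a fold inserting a key-determined value; lookup afterwards.
theorem get?_foldl_insert {κ ν : Type} [BEq κ] [LawfulBEq κ] [DecidableEq κ]
    (G : κ → ν) (l : List κ) (d : PySem.Dict κ ν) (k : κ) :
    (l.foldl (fun d s => d.insert s (G s)) d).get? k = if k ∈ l then some (G k) else d.get? k := by
  induction l generalizing d with
  | nil => simp
  | cons s t ih =>
    simp only [List.foldl_cons, ih, List.mem_cons]
    by_cases hk : k ∈ t
    · simp [hk]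
    · by_cases hks : k = s
      · simp [hks, PySem.Dict.get?_insert_self]
      · simp [hk, hks, PySem.Dict.get?_insert_of_ne _ _ hks]

-- The phase-1 fold only grows the state set.
theorem stepDown_mono (loot : List Int) (rc : PySem.Dict (List Int) Int) (j : Nat)
    (l : List (Int × Int × Int)) (acc : PySem.Set (Int × Int × Int)) (x : Int × Int × Int) (hx : x ∈ acc) :
    x ∈ l.foldl (fun prev s =>
      if (rc.get? [(j : Int), s.1, s.2.1, s.2.2]).isSome then prev
      else
        let v := (PySem.List.pyGet? loot ((j : Int) - 1)).getD 0
        PySem.Set.add (PySem.Set.add (PySem.Set.add prev (s.1 - v, s.2.1, s.2.2)) (s.1, s.2.1 - v, s.2.2)) (s.1, s.2.1, s.2.2 - v)) acc := by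
  induction l generalizing acc with
  | nil => exact hx
  | cons s t ih =>
    refine List.foldl_cons .. ▸ ih _ ?_
    dsimp only
    split
    · exact hx
    · simp only [PySem.Set.mem_add]
      tauto

-- Every uncached state's three children are in the next layer down.
theorem children_mem_stepDown (loot : List Int) (rc : PySem.Dict (List Int) Int) (j : Nat)
    (cur : PySem.Set (Int × Int × Int)) (s : Int × Int × Int) (hs : s ∈ cur)
    (hrc : rc.get? [(j : Int), s.1, s.2.1, s.2.2] = none) :
    (s.1 - (PySem.List.pyGet? loot ((j : Int) - 1)).getD 0, s.2.1, s.2.2) ∈ stepDown loot rc j cur ∧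
    (s.1, s.2.1 - (PySem.List.pyGet? loot ((j : Int) - 1)).getD 0, s.2.2) ∈ stepDown loot rc j cur ∧
    (s.1, s.2.1, s.2.2 - (PySem.List.pyGet? loot ((j : Int) - 1)).getD 0) ∈ stepDown loot rc j cur := by
  unfold stepDown
  generalize PySem.Set.empty = acc
  induction cur generalizing acc with
  | nil => cases hs
  | cons x t ih =>
    rcases List.mem_cons.mp hs with hxs | hst
    · subst hxs
      rw [List.foldl_cons]
      have hnext : ∀ y, (y = (s.1 - (PySem.List.pyGet? loot ((j : Int) - 1)).getD 0, s.2.1, s.2.2) ∨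
          y = (s.1, s.2.1 - (PySem.List.pyGet? loot ((j : Int) - 1)).getD 0, s.2.2) ∨
          y = (s.1, s.2.1, s.2.2 - (PySem.List.pyGet? loot ((j : Int) - 1)).getD 0)) →
          y ∈ (if (rc.get? [(j : Int), s.1, s.2.1, s.2.2]).isSome then acc
            else
              let v := (PySem.List.pyGet? loot ((j : Int) - 1)).getD 0
              PySem.Set.add (PySem.Set.add (PySem.Set.add acc (s.1 - v, s.2.1, s.2.2)) (s.1, s.2.1 - v, s.2.2)) (s.1, s.2.1, s.2.2 - v)) := by
        intro y hy
        rw [hrc]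
        simp only [Option.isSome_none, Bool.false_eq_true, if_false, PySem.Set.mem_add]
        tauto
      exact ⟨stepDown_mono loot rc j t _ _ (hnext _ (Or.inl rfl)),
             stepDown_mono loot rc j t _ _ (hnext _ (Or.inr (Or.inl rfl))),
             stepDown_mono loot rc j t _ _ (hnext _ (Or.inr (Or.inr rfl)))⟩
    · rw [List.foldl_cons]; exact ih hst _

theorem buildLayers_ne_nil (loot : List Int) (rc : PySem.Dict (List Int) Int) (j : Nat) (cur : PySem.Set (Int × Int × Int)) :
    buildLayers loot rc j cur ≠ [] := by
  cases j <;> simp [buildLayers]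

theorem evalUp_cons (loot : List Int) (rc : PySem.Dict (List Int) Int) (j : Nat)
    (L : PySem.Set (Int × Int × Int)) (rest : List (Nat × PySem.Set (Int × Int × Int))) (h : rest ≠ []) :
    evalUp loot rc ((j, L) :: rest) = evalStep loot rc j L (evalUp loot rc rest) := by
  cases rest with
  | nil => exact absurd rfl h
  | cons p t => cases p; rfl

-- evalBase as a key-determined insert fold.
theorem evalBase_eq (rc : PySem.Dict (List Int) Int) (L : PySem.Set (Int × Int × Int)) :
    evalBase rc L = L.foldl (fun d s => d.insert s
      (match rc.get? [(0 : Int), s.1, s.2.1, s.2.2] with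
       | some w => w
       | none => if s.1 = 0 ∧ s.2.1 = 0 ∧ s.2.2 = 0 then (1 : Int) else 0)) PySem.Dict.empty := by
  unfold evalBase
  congr 1
  funext d s
  cases rc.get? [(0 : Int), s.1, s.2.1, s.2.2] <;> rfl

-- evalStep as a key-determined insert fold.
theorem evalStep_eq (loot : List Int) (rc : PySem.Dict (List Int) Int) (j : Nat)
    (L : PySem.Set (Int × Int × Int)) (vprev : PySem.Dict (Int × Int × Int) Int) :
    evalStep loot rc j L vprev = L.foldl (fun d s => d.insert s
      (match rc.get? [(j : Int), s.1, s.2.1, s.2.2] with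
       | some w => w
       | none =>
         let v := (PySem.List.pyGet? loot ((j : Int) - 1)).getD 0
         max ((vprev.get? (s.1 - v, s.2.1, s.2.2)).getD 0)
           (max ((vprev.get? (s.1, s.2.1 - v, s.2.2)).getD 0)
             ((vprev.get? (s.1, s.2.1, s.2.2 - v)).getD 0)))) PySem.Dict.empty := by
  unfold evalStep
  congr 1
  funext d s
  cases rc.get? [(j : Int), s.1, s.2.1, s.2.2] <;> rfl

-- Main B-side lemma: the bottom-up table at level j records gP on every state of layer j.
theorem lemB (loot : List Int) (rc : PySem.Dict (List Int) Int) :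
    ∀ (j : Nat) (cur : PySem.Set (Int × Int × Int)) (s : Int × Int × Int), s ∈ cur →
      (evalUp loot rc (buildLayers loot rc j cur)).get? s = some (gP loot rc j s.1 s.2.1 s.2.2) := by
  intro j
  induction j with
  | zero =>
    intro cur s hs
    rw [buildLayers]
    show (evalBase rc cur).get? s = _
    rw [evalBase_eq, get?_foldl_insert, if_pos hs]
    cases hrc : rc.get? [(0 : Int), s.1, s.2.1, s.2.2] with
    | some w => rw [gP]; norm_num [hrc]
    | none => rw [gP]; norm_num [hrc]
  | succ m ih =>
    intro cur s hs
    rw [buildLayers, evalUp_cons loot rc _ _ _ (buildLayers_ne_nil loot rc m _)]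
    rw [evalStep_eq, get?_foldl_insert, if_pos hs]
    cases hrc : rc.get? [((Nat.succ m : Nat) : Int), s.1, s.2.1, s.2.2] with
    | some w =>
      rw [gP]
      push_cast at hrc
      norm_num [hrc]
    | none =>
      have hcast : ((Nat.succ m : Nat) : Int) - 1 = (m : Int) := by push_cast; ring
      have hch := children_mem_stepDown loot rc (Nat.succ m) cur s hs hrc
      rw [hcast] at hch
      have g1 := ih (stepDown loot rc (Nat.succ m) cur) _ hch.1
      have g2 := ih (stepDown loot rc (Nat.succ m) cur) _ hch.2.1
      have g3 := ih (stepDown loot rc (Nat.succ m) cur) _ hch.2.2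
      rw [gP]
      push_cast at hrc
      simp only [Nat.succ_eq_add_one, PySem.List.pyGet?_natCast, Prod.mk.eta] at g1 g2 g3
      norm_num [hrc, hcast, g1, g2, g3]

-- ===== VERDICT (by name: the statement is the Claim_ definition above) =====
theorem splitting_pirate_loot_spec : Claim_equal_splitting_pirate_loot := by
  intro i s1 s2 s3 loot rc _ _
  unfold Spec_splitting_pirate_loot splitting_pirate_loot splitting_pirate_loot_alt
  have hInvA : InvA loot ⟨rc⟩ ⟨rc⟩ := ⟨fun k v h => Or.inl h, fun k v h => h⟩
  have hA := (lemA loot ⟨rc⟩ i.toNat s1 s2 s3 ⟨rc⟩ hInvA).1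
  have hmem : (s1, s2, s3) ∈ PySem.Set.add PySem.Set.empty (s1, s2, s3) := by
    simp [PySem.Set.empty]
  have hB := lemB loot ⟨rc⟩ i.toNat (PySem.Set.add PySem.Set.empty (s1, s2, s3)) (s1, s2, s3) hmem
  rw [hA, hB]
  rfl
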